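-- pv_equiv track=rewrite | github.com/NastyJack/shoppingCartSystem | pythonScript/analyseCart.py | calculate_discounted_total
-- ===== SOURCE A (Python) =====
-- from collections import Counter, defaultdict
--
-- PRICES = {
--     "Apple": 35,
--     "Banana": 20,
--     "Melon": 50,   # Buy one get one free
--     "Lime": 15     # 3-for-2 offer
-- }
--
-- def calculate_discounted_total(cart):
--     counter = Counter(cart)
--     total = 0
--     for item, qty in counter.items():
--         if item == "Melon":
--             total += ((qty // 2) + (qty % 2)) * PRICES[item]
--         elif item == "Lime":
--             total += ((qty // 3) * 2 + qty % 3) * PRICES[item]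
--         else:
--             total += qty * PRICES[item]
--     return total
-- ===== SOURCE B (Python) =====
-- PRICES = {
--     "Apple": 35,
--     "Banana": 20,
--     "Melon": 50,   # Buy one get one free
--     "Lime": 15     # 3-for-2 offer
-- }
--
-- def calculate_discounted_total(cart):
--     total = sum(PRICES[item] for item in cart)
--     melons = cart.count("Melon")
--     limes = cart.count("Lime")
--     return total - (melons // 2) * PRICES["Melon"] - (limes // 3) * PRICES["Lime"]
-- ===== Notes on version B (the rewrite author's own statement) =====
-- stated objective: simpler
-- what changed: Replaces A's per-distinct-item Counter loop with branch-wise discounted prices by a plain gross sum of prices over the cart minus two closed-form deductions, one for the buy-one-get-one melon offer and one for the 3-for-2 lime offer.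
import Mathlib
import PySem

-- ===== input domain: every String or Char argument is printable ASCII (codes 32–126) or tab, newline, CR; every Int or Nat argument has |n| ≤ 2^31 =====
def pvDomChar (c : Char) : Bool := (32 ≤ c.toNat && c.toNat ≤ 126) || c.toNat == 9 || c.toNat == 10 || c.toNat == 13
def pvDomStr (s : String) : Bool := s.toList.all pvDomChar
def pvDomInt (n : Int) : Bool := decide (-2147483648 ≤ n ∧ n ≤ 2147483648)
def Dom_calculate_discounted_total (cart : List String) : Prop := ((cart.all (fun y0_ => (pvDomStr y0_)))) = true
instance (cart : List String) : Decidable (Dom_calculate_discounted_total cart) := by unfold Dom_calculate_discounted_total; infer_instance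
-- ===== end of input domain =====

-- B replaces A's per-distinct-item branch loop (discounted price per Counter entry) by a plain
-- gross sum over the cart minus two closed-form deductions for the Melon and Lime offers
-- (objective: simpler decomposition, same cost).

-- ===== PORT A =====
-- PRICES from the module (a dict literal)
def pvPRICES : PySem.Dict String Int :=
  PySem.Dict.ofList [("Apple", 35), ("Banana", 20), ("Melon", 50), ("Lime", 15)]

-- PRICES[item]: under Pre_ the key is present, so .getD 0 is exact (KeyError is excluded by Pre_)
-- counter = Counter(cart); then the for-loop over counter.items()
def calculate_discounted_total (cart : List String) : Int :=
  (PySem.Dict.counter cart).items.foldl (fun total kv =>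
    if kv.1 == "Melon" then
      total + (PySem.Int.floordiv kv.2 2 + PySem.Int.mod kv.2 2) * ((pvPRICES.get? kv.1).getD 0)
    else if kv.1 == "Lime" then
      total + (PySem.Int.floordiv kv.2 3 * 2 + PySem.Int.mod kv.2 3) * ((pvPRICES.get? kv.1).getD 0)
    else
      total + kv.2 * ((pvPRICES.get? kv.1).getD 0)) 0

-- ===== PORT B =====
def calculate_discounted_total_alt (cart : List String) : Int :=
  let total := (cart.map (fun item => (pvPRICES.get? item).getD 0)).sum
  let melons : Int := (cart.count "Melon" : Int)
  let limes : Int := (cart.count "Lime" : Int)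
  total - PySem.Int.floordiv melons 2 * ((pvPRICES.get? "Melon").getD 0)
        - PySem.Int.floordiv limes 3 * ((pvPRICES.get? "Lime").getD 0)

-- ===== PRECONDITION & SPEC =====
-- Pre_ excludes carts containing an item that is not a key of PRICES: Python A (and B) raise KeyError there.
def Pre_calculate_discounted_total (cart : List String) : Prop :=
  ∀ item ∈ cart, item = "Apple" ∨ item = "Banana" ∨ item = "Melon" ∨ item = "Lime"
instance (cart : List String) : Decidable (Pre_calculate_discounted_total cart) := by
  unfold Pre_calculate_discounted_total; infer_instance
def pvWitness_calculate_discounted_total : List String := ["Melon", "Melon", "Lime", "Apple", "Lime", "Lime"]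

def Spec_calculate_discounted_total (cart : List String) (out : Int) : Prop := out = calculate_discounted_total_alt cart
instance (cart : List String) (out : Int) : Decidable (Spec_calculate_discounted_total cart out) := by unfold Spec_calculate_discounted_total; infer_instance

-- ===== CLAIM (what is proved, stated in full; the proofs are below) =====
def Claim_equal_calculate_discounted_total : Prop := ∀ (cart : List String), Dom_calculate_discounted_total cart → Pre_calculate_discounted_total cart → Spec_calculate_discounted_total cart (calculate_discounted_total cart)

-- ===== LEMMAS AND PROOFS =====

-- price of one item (PRICES lookup with default 0; total on all strings)
def pvPrice (k : String) : Int := (pvPRICES.get? k).getD 0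

-- A's per-entry contribution for key k occurring q times
def pvContribA (k : String) (q : Int) : Int :=
  if k == "Melon" then (PySem.Int.floordiv q 2 + PySem.Int.mod q 2) * pvPrice k
  else if k == "Lime" then (PySem.Int.floordiv q 3 * 2 + PySem.Int.mod q 3) * pvPrice k
  else q * pvPrice k

-- the discount A's branch formula hides: contribution = gross − discount
def pvDisc (k : String) (q : Int) : Int :=
  (if k = "Melon" then PySem.Int.floordiv q 2 * pvPrice "Melon" else 0)
  + (if k = "Lime" then PySem.Int.floordiv q 3 * pvPrice "Lime" else 0)

lemma pvContribA_eq (k : String) (n : Nat) :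
    pvContribA k (n : Int) = (n : Int) * pvPrice k - pvDisc k (n : Int) := by
  unfold pvContribA pvDisc
  by_cases hm : k = "Melon"
  · subst hm
    simp only [beq_self_eq_true, if_true]
    have h2 : (PySem.Int.floordiv (n : Int) 2) = ((n / 2 : Nat) : Int) := PySem.Int.floordiv_natCast n 2
    have h2' : (PySem.Int.mod (n : Int) 2) = ((n % 2 : Nat) : Int) := PySem.Int.mod_natCast n 2
    have : ("Melon" : String) = "Lime" ↔ False := by simp
    rw [h2, h2']
    simp only [this, if_false]
    have key : n / 2 + n % 2 = n - n / 2 := by omega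
    rw [← Nat.cast_add, key, Nat.cast_sub (Nat.div_le_self n 2)]
    ring
  · by_cases hl : k = "Lime"
    · subst hl
      simp only [beq_self_eq_true, if_true]
      have hne : (("Lime" : String) == "Melon") = false := by decide
      rw [hne]
      simp only [Bool.false_eq_true, if_false, if_neg (by decide : ¬ ("Lime" : String) = "Melon")]
      have h3 : (PySem.Int.floordiv (n : Int) 3) = ((n / 3 : Nat) : Int) := PySem.Int.floordiv_natCast n 3
      have h3' : (PySem.Int.mod (n : Int) 3) = ((n % 3 : Nat) : Int) := PySem.Int.mod_natCast n 3
      rw [h3, h3']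
      have key : n / 3 * 2 + n % 3 = n - n / 3 := by omega
      have : ((n / 3 : Nat) : Int) * 2 + ((n % 3 : Nat) : Int) = ((n / 3 * 2 + n % 3 : Nat) : Int) := by push_cast; ring
      rw [this, key, Nat.cast_sub (Nat.div_le_self n 3)]
      ring
    · have hm' : (k == "Melon") = false := by simp [hm]
      have hl' : (k == "Lime") = false := by simp [hl]
      rw [hm', hl']
      simp [hm, hl]

lemma pv_toFinset_ofList (xs : List String) : (PySem.Set.ofList xs).toFinset = xs.toFinset := by
  ext x
  simp [List.mem_toFinset, PySem.Set.mem_ofList]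

-- sum of an "only at key a" summand over a finset
lemma pv_sum_single (s : Finset String) (a : String) (u : String → Int) (h0 : a ∉ s → u a = 0) :
    (∑ k ∈ s, if k = a then u k else 0) = u a := by
  by_cases ha : a ∈ s
  · rw [Finset.sum_ite_eq' s a u]
    simp [ha]
  · rw [Finset.sum_ite_eq' s a u]
    simp [ha, h0 ha]

lemma pv_foldl_contrib (l : List (String × Int)) (a : Int) :
    l.foldl (fun total kv =>
      if kv.1 == "Melon" then
        total + (PySem.Int.floordiv kv.2 2 + PySem.Int.mod kv.2 2) * ((pvPRICES.get? kv.1).getD 0)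
      else if kv.1 == "Lime" then
        total + (PySem.Int.floordiv kv.2 3 * 2 + PySem.Int.mod kv.2 3) * ((pvPRICES.get? kv.1).getD 0)
      else
        total + kv.2 * ((pvPRICES.get? kv.1).getD 0)) a
    = a + (l.map (fun kv => pvContribA kv.1 kv.2)).sum := by
  induction l generalizing a with
  | nil => simp
  | cons kv t ih =>
    simp only [List.foldl_cons, List.map_cons, List.sum_cons, ih]
    unfold pvContribA pvPrice
    split_ifs <;> ring

lemma pvA_eq (cart : List String) :
    calculate_discounted_total cart = ((PySem.Set.ofList cart).map (fun k => pvContribA k ((cart.count k : Nat) : Int))).sum := by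
  unfold calculate_discounted_total
  rw [PySem.Dict.items_counter, pv_foldl_contrib]
  simp [List.map_map, Function.comp_def]

theorem pv_main (cart : List String) :
    calculate_discounted_total cart = calculate_discounted_total_alt cart := by
  rw [pvA_eq]
  have hnd : (PySem.Set.ofList cart).Nodup := PySem.Set.nodup_ofList cart
  rw [← List.sum_toFinset _ hnd, pv_toFinset_ofList]
  have hgross : (cart.map (fun item => (pvPRICES.get? item).getD 0)).sum
      = ∑ k ∈ cart.toFinset, (cart.count k : Int) * pvPrice k := by
    rw [Finset.sum_list_map_count cart (fun item => (pvPRICES.get? item).getD 0)]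
    exact Finset.sum_congr rfl (fun k _ => by simp [pvPrice])
  have step1 : (∑ k ∈ cart.toFinset, pvContribA k ((cart.count k : Nat) : Int))
      = (∑ k ∈ cart.toFinset, (cart.count k : Int) * pvPrice k)
        - (∑ k ∈ cart.toFinset, pvDisc k (cart.count k : Int)) := by
    rw [← Finset.sum_sub_distrib]
    exact Finset.sum_congr rfl (fun k _ => pvContribA_eq k _)
  have hdisc : (∑ k ∈ cart.toFinset, pvDisc k (cart.count k : Int))
      = PySem.Int.floordiv (cart.count "Melon" : Int) 2 * pvPrice "Melon"
        + PySem.Int.floordiv (cart.count "Lime" : Int) 3 * pvPrice "Lime" := by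
    unfold pvDisc
    rw [Finset.sum_add_distrib]
    rw [pv_sum_single _ "Melon" (fun k => PySem.Int.floordiv (cart.count k : Int) 2 * pvPrice "Melon")
      (by intro h
          beta_reduce
          rw [List.count_eq_zero_of_not_mem (by simpa using h)]
          simp)]
    rw [pv_sum_single _ "Lime" (fun k => PySem.Int.floordiv (cart.count k : Int) 3 * pvPrice "Lime")
      (by intro h
          beta_reduce
          rw [List.count_eq_zero_of_not_mem (by simpa using h)]
          simp)]
  rw [step1, hdisc]
  dsimp only [calculate_discounted_total_alt]
  rw [hgross]
  simp only [pvPrice]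
  ring

-- ===== VERDICT (by name: the statement is the Claim_ definition above) =====
theorem calculate_discounted_total_spec : Claim_equal_calculate_discounted_total := by
  intro cart _ _
  unfold Spec_calculate_discounted_total
  exact pv_main cart
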